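-- pv_equiv track=rewrite | github.com/saultyevil/slashbot | slashbot/logger.py | _extract_latest_error_block
-- ===== SOURCE A (Python) =====
-- def _extract_latest_error_block(lines: list[str]) -> list[str]:
--     for i in range(len(lines) - 1, -1, -1):
--         if "ERROR" in lines[i]:
--             block = [lines[i]]
--             for j in range(i + 1, len(lines)):
--                 if any(level_name in lines[j] for level_name in ("ERROR", "INFO", "WARNING", "DEBUG")):
--                     break
--                 block.append(lines[j])
--             return block
--     return []
-- ===== SOURCE B (Python) =====
-- def _extract_latest_error_block(lines: list[str]) -> list[str]:
--     saved = []
--     collecting = False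
--     for line in lines:
--         if "ERROR" in line:
--             saved = [line]
--             collecting = True
--         elif any(m in line for m in ("INFO", "WARNING", "DEBUG")):
--             collecting = False
--         elif collecting:
--             saved.append(line)
--     return saved
-- ===== Notes on version B (the rewrite author's own statement) =====
-- stated objective: alternative
-- what changed: Replaces the backward scan for the last ERROR line plus a bounded forward re-collection with a single forward pass that segments the log into blocks, keeping the latest ERROR block in an accumulator.
import Mathlib
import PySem

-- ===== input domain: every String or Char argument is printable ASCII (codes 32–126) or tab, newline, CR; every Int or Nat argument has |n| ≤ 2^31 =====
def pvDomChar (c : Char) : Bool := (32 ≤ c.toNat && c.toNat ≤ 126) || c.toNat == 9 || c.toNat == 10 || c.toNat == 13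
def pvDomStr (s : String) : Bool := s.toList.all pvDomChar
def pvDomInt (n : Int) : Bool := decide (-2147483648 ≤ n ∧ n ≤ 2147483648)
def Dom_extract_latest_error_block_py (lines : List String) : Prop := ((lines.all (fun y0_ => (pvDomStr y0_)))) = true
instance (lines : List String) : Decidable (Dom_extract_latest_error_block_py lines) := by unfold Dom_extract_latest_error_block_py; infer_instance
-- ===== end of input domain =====

-- B replaces A's backward scan + bounded forward re-collection with one forward
-- block-segmenting pass (alternative decomposition, same result).


-- ===== PORT A =====
-- "ERROR" in l
def pvHasErr (l : String) : Bool := PySem.Str.isIn "ERROR" l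

-- any(level_name in lines[j] for level_name in ("ERROR", "INFO", "WARNING", "DEBUG"))
def pvAnyMarker (l : String) : Bool :=
  PySem.Str.isIn "ERROR" l || PySem.Str.isIn "INFO" l ||
  PySem.Str.isIn "WARNING" l || PySem.Str.isIn "DEBUG" l

-- inner loop: append following lines until a marker line (break)
def pvA_inner : List String → List String
  | [] => []
  | l :: rest => if pvAnyMarker l then [] else l :: pvA_inner rest

-- outer loop: for i in range(len(lines)-1, -1, -1); argument n = i+1
def pvA_loop (lines : List String) : Nat → List String
  | 0 => []
  | n + 1 =>
      if pvHasErr (lines.getD n "") then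
        lines.getD n "" :: pvA_inner (lines.drop (n + 1))
      else pvA_loop lines n

def extract_latest_error_block_py (lines : List String) : List String :=
  pvA_loop lines lines.length

-- ===== PORT B =====
-- any(m in line for m in ("INFO", "WARNING", "DEBUG"))
def pvMarker3 (l : String) : Bool :=
  PySem.Str.isIn "INFO" l || PySem.Str.isIn "WARNING" l || PySem.Str.isIn "DEBUG" l

-- one forward step of B's loop: state = (collecting, saved)
def pvB_step (st : Bool × List String) (l : String) : Bool × List String :=
  if PySem.Str.isIn "ERROR" l then (true, [l])
  else if pvMarker3 l then (false, st.2)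
  else if st.1 then (st.1, st.2 ++ [l])
  else st

def extract_latest_error_block_py_alt (lines : List String) : List String :=
  (lines.foldl pvB_step (false, [])).2

-- ===== PRECONDITION & SPEC =====
def Spec_extract_latest_error_block_py (lines : List String) (out : List String) : Prop := out = extract_latest_error_block_py_alt lines
instance (lines : List String) (out : List String) : Decidable (Spec_extract_latest_error_block_py lines out) := by unfold Spec_extract_latest_error_block_py; infer_instance

-- ===== CLAIM (what is proved, stated in full; the proofs are below) =====
def Claim_equal_extract_latest_error_block_py : Prop := ∀ (lines : List String), Dom_extract_latest_error_block_py lines → Spec_extract_latest_error_block_py lines (extract_latest_error_block_py lines)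

-- ===== LEMMAS AND PROOFS =====

-- "non-marker" line
def pvNM (l : String) : Bool := !pvAnyMarker l

lemma pvAnyMarker_eq (l : String) : pvAnyMarker l = (pvHasErr l || pvMarker3 l) := by
  simp [pvAnyMarker, pvMarker3, pvHasErr, Bool.or_assoc]

lemma pvA_inner_all_self {ys : List String} (h : ys.all pvNM = true) : pvA_inner ys = ys := by
  induction ys with
  | nil => rfl
  | cons l ys ih =>
      simp only [List.all_cons, Bool.and_eq_true, pvNM, Bool.not_eq_true'] at h
      simp [pvA_inner, h.1, ih h.2]

lemma pvA_inner_append_all {ys : List String} (zs : List String)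
    (h : ys.all pvNM = true) : pvA_inner (ys ++ zs) = ys ++ pvA_inner zs := by
  induction ys with
  | nil => simp
  | cons l ys ih =>
      simp only [List.all_cons, Bool.and_eq_true, pvNM, Bool.not_eq_true'] at h
      simp [pvA_inner, h.1, ih h.2]

lemma pvA_inner_append_not {ys : List String} (zs : List String)
    (h : ys.all pvNM = false) : pvA_inner (ys ++ zs) = pvA_inner ys := by
  induction ys with
  | nil => simp at h
  | cons l ys ih =>
      by_cases hm : pvAnyMarker l = true
      · simp [pvA_inner, hm]
      · simp only [List.all_cons, Bool.and_eq_false_iff, pvNM] at h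
        rcases h with h | h
        · simp_all
        · simp [pvA_inner, hm, ih h]

-- "the block starting at the last ERROR line among indices < n runs to the end of lines"
def pvOpenN (lines : List String) : Nat → Bool
  | 0 => false
  | n + 1 =>
      if pvHasErr (lines.getD n "") then (lines.drop (n + 1)).all pvNM
      else pvOpenN lines n

lemma pvGetD_append_left {xs : List String} {x : String} {n : Nat} (h : n < xs.length) :
    (xs ++ [x]).getD n "" = xs.getD n "" := by
  simp [List.getD, List.getElem?_append_left h]

lemma pvOpenN_append (xs : List String) (x : String) :
    ∀ n, n ≤ xs.length → pvOpenN (xs ++ [x]) n = (pvOpenN xs n && pvNM x) := by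
  intro n
  induction n with
  | zero => simp [pvOpenN]
  | succ n ih =>
      intro hn
      have hlt : n < xs.length := by omega
      have hdrop : (xs ++ [x]).drop (n + 1) = xs.drop (n + 1) ++ [x] :=
        List.drop_append_of_le_length (by omega)
      rw [pvOpenN, pvOpenN, pvGetD_append_left hlt]
      by_cases he : pvHasErr (xs.getD n "") = true
      · rw [if_pos he, if_pos he, hdrop]
        simp [Bool.and_comm]
      · rw [if_neg he, if_neg he]
        exact ih (by omega)

lemma pvA_loop_append (xs : List String) (x : String) :
    ∀ n, n ≤ xs.length →
      pvA_loop (xs ++ [x]) n =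
        (if pvOpenN xs n && pvNM x then pvA_loop xs n ++ [x] else pvA_loop xs n) := by
  intro n
  induction n with
  | zero => simp [pvA_loop, pvOpenN]
  | succ n ih =>
      intro hn
      have hlt : n < xs.length := by omega
      have hdrop : (xs ++ [x]).drop (n + 1) = xs.drop (n + 1) ++ [x] :=
        List.drop_append_of_le_length (by omega)
      rw [pvA_loop, pvA_loop, pvOpenN, pvGetD_append_left hlt]
      by_cases he : pvHasErr (xs.getD n "") = true
      · rw [if_pos he, if_pos he, if_pos he, hdrop]
        by_cases ha : (xs.drop (n + 1)).all pvNM = true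
        · rw [pvA_inner_append_all _ ha, pvA_inner_all_self ha]
          cases hx : pvAnyMarker x with
          | false => simp [pvA_inner, hx, ha, pvNM]
          | true => simp [pvA_inner, hx, ha, pvNM]
        · rw [pvA_inner_append_not _ (by simpa using ha)]
          simp [ha]
      · rw [if_neg he, if_neg he, if_neg he]
        exact ih (by omega)

lemma pvMain (xs : List String) :
    xs.foldl pvB_step (false, []) = (pvOpenN xs xs.length, pvA_loop xs xs.length) := by
  induction xs using List.reverseRecOn with
  | nil => rfl
  | append_singleton xs x ih =>
      rw [List.foldl_append, ih]
      have hget : (xs ++ [x]).getD xs.length "" = x := by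
        simp [List.getD]
      have hlen : (xs ++ [x]).length = xs.length + 1 := by simp
      rw [hlen, pvA_loop, pvOpenN, hget]
      rw [show List.drop (xs.length + 1) (xs ++ [x]) = [] by simp]
      by_cases he : pvHasErr x = true
      · rw [if_pos he, if_pos he]
        have heI : PySem.Str.isIn "ERROR" x = true := he
        simp only [List.foldl_cons, List.foldl_nil, pvB_step]
        rw [if_pos heI]
        simp [pvA_inner]
      · rw [if_neg he, if_neg he,
            pvA_loop_append xs x xs.length le_rfl, pvOpenN_append xs x xs.length le_rfl]
        have he' : pvHasErr x = false := by simpa using he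
        simp only [List.foldl_cons, List.foldl_nil, pvB_step]
        rw [if_neg (by simpa [pvHasErr] using he)]
        by_cases hm : pvMarker3 x = true
        · have hnm : pvNM x = false := by
            simp [pvNM, pvAnyMarker_eq, hm]
          rw [if_pos hm]
          simp [hnm]
        · have hm' : pvMarker3 x = false := by simpa using hm
          have hnm : pvNM x = true := by
            simp [pvNM, pvAnyMarker_eq, hm', he']
          rw [if_neg hm]
          by_cases ho : pvOpenN xs xs.length = true
          · rw [if_pos ho]
            simp [ho, hnm]
          · have ho' : pvOpenN xs xs.length = false := by simpa using ho
            rw [if_neg ho]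
            simp [ho', hnm]

-- ===== VERDICT (by name: the statement is the Claim_ definition above) =====
theorem extract_latest_error_block_py_spec : Claim_equal_extract_latest_error_block_py := by
  intro lines _
  unfold Spec_extract_latest_error_block_py extract_latest_error_block_py extract_latest_error_block_py_alt
  rw [pvMain]
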